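-- pv_equiv track=rewrite | github.com/dionysos1/ISCRIP | week5/forsythEdwardsNotatie.py | grid2fen
-- ===== SOURCE A (Python) =====
-- def grid2fen(grid: str, emptysign='*') -> str:
--     # je krijgt een grid binnen met enters erin.
--     string = ''
--     teller = 0
--     # splits het grid op bij elke enter
--     rows = grid.split('\n')
--     expectedRows = 0
--     # loop door de rijen heen en zet het netjes achter elkaar.
--     for x in rows:
--         for y in x:
--             # als er een emptysign tekentje staat zet een teller omhoog.
--             if y == emptysign:
--                 teller += 1
--
--             if not y == emptysign:
--                 if teller != 0:
--                     # zet het nummer van de teller neer in de string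
--                     string += str(teller)
--                 string += y
--                 teller = 0
--         # als na de loop de teller geen 0 is. zet hem achter de string en reset hem.
--         if teller != 0:
--             string += str(teller)
--         teller = 0
--         expectedRows += 1
--         if expectedRows != len(rows):
--             string += '/'
--     return string
-- ===== SOURCE B (Python) =====
-- def grid2fen(grid: str, emptysign='*') -> str:
--     # Run-length encode each row by scanning maximal runs, then join rows with '/'.
--     def encode(row):
--         parts = []
--         i = 0
--         n = len(row)
--         while i < n:
--             j = i
--             while j < n and row[j] == row[i]:
--                 j += 1
--             if row[i] == emptysign:
--                 parts.append(str(j - i))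
--             else:
--                 parts.append(row[i:j])
--             i = j
--         return ''.join(parts)
--     return '/'.join(encode(row) for row in grid.split('\n'))
-- ===== Notes on version B (the rewrite author's own statement) =====
-- stated objective: idiomatic
-- what changed: Replaces the single accumulator loop with a mutable counter, flush logic and trailing-separator bookkeeping by a per-row maximal-run scan (run-length encoding of each row) whose results are joined with the row separator via str.join.
import Mathlib
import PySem

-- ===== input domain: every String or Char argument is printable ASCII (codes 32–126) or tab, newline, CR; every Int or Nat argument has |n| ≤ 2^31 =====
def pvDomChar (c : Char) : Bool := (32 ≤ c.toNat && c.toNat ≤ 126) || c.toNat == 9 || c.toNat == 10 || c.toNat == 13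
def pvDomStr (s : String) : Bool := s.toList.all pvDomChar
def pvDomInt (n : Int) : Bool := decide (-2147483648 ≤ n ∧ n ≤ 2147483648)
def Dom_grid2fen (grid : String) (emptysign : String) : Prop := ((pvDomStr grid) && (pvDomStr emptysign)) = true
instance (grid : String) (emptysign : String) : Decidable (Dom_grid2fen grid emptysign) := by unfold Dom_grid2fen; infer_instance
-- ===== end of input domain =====

-- B replaces A's counter/flush/trailing-slash bookkeeping by per-row maximal-run scans joined with '/'; idiomatic, same cost.

-- ===== PORT A =====
-- inner loop body: 'for y in x' updating (string, teller)
def grid2fenInner (es : List Char) (st : List Char × Int) (y : Char) : List Char × Int :=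
  let st1 := if [y] = es then (st.1, st.2 + 1) else st
  if ¬ ([y] = es) then
    let s1 := if st1.2 ≠ 0 then st1.1 ++ PySem.Int.toChars st1.2 else st1.1
    (s1 ++ [y], (0 : Int))
  else st1

-- outer loop body: one row; state = (string, teller, expectedRows)
def grid2fenOuter (es : List Char) (nrows : Nat) (st : List Char × Int × Int) (x : List Char) :
    List Char × Int × Int :=
  let p := x.foldl (grid2fenInner es) (st.1, st.2.1)
  let s1 := if p.2 ≠ 0 then p.1 ++ PySem.Int.toChars p.2 else p.1
  let er := st.2.2 + 1
  let s2 := if er ≠ (nrows : Int) then s1 ++ ['/'] else s1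
  (s2, 0, er)

def grid2fen (grid : String) (emptysign : String) : String :=
  let rows := PySem.Chars.splitOn grid.toList ['\n']
  String.ofList (rows.foldl (grid2fenOuter emptysign.toList rows.length) ([], 0, 0)).1

-- ===== PORT B =====
-- encode one row: find the maximal run of the leading char, emit it, recurse on the remainder
def grid2fenEnc (es : List Char) : List Char → List Char
  | [] => []
  | c :: rest =>
    let run := rest.takeWhile (· = c)
    let rem := rest.dropWhile (· = c)
    (if [c] = es then PySem.Int.toChars ((run.length : Int) + 1) else c :: run) ++ grid2fenEnc es rem
termination_by row => row.length
decreasing_by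
  show (rest.dropWhile (· = c)).length < (c :: rest).length
  calc (rest.dropWhile (· = c)).length ≤ rest.length := List.length_dropWhile_le _ _
    _ < (c :: rest).length := by simp

def grid2fen_alt (grid : String) (emptysign : String) : String :=
  let rows := PySem.Chars.splitOn grid.toList ['\n']
  String.ofList (PySem.Chars.join ['/'] (rows.map (grid2fenEnc emptysign.toList)))

-- ===== PRECONDITION & SPEC =====
def Spec_grid2fen (grid : String) (emptysign : String) (out : String) : Prop := out = grid2fen_alt grid emptysign
instance (grid : String) (emptysign : String) (out : String) : Decidable (Spec_grid2fen grid emptysign out) := by unfold Spec_grid2fen; infer_instance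

-- ===== CLAIM (what is proved, stated in full; the proofs are below) =====
def Claim_equal_grid2fen : Prop := ∀ (grid : String) (emptysign : String), Dom_grid2fen grid emptysign → Spec_grid2fen grid emptysign (grid2fen grid emptysign)

-- ===== LEMMAS AND PROOFS =====

theorem pvEnc_nil (es : List Char) : grid2fenEnc es [] = [] := by
  conv_lhs => unfold grid2fenEnc

theorem pvEnc_cons (es : List Char) (c : Char) (rest : List Char) :
    grid2fenEnc es (c :: rest)
      = (if [c] = es then PySem.Int.toChars (((rest.takeWhile (· = c)).length : Int) + 1)
         else c :: rest.takeWhile (· = c)) ++ grid2fenEnc es (rest.dropWhile (· = c)) := by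
  conv_lhs => unfold grid2fenEnc

-- flushing the pending counter, as A does at the end of a row
def pvFlush (p : List Char × Int) : List Char :=
  if p.2 ≠ 0 then p.1 ++ PySem.Int.toChars p.2 else p.1

theorem pvFlush_zero (s : List Char) : pvFlush (s, 0) = s := by simp [pvFlush]

theorem pvFlush_ne (s : List Char) (k : Int) (hk : k ≠ 0) :
    pvFlush (s, k) = s ++ PySem.Int.toChars k := by simp [pvFlush, hk]

-- a run of emptysign characters only increments the counter
theorem pvInner_run (es : List Char) (cs : List Char) (h : ∀ ch ∈ cs, [ch] = es) :
    ∀ s t, cs.foldl (grid2fenInner es) (s, t) = (s, t + cs.length) := by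
  induction cs with
  | nil => intro s t; simp
  | cons c cs ih =>
    intro s t
    have hc : [c] = es := h c (by simp)
    have hstep : grid2fenInner es (s, t) c = (s, t + 1) := by simp [grid2fenInner, hc]
    rw [List.foldl_cons, hstep, ih (fun ch hch => h ch (by simp [hch])) s (t + 1)]
    simp [Prod.ext_iff]
    ring

-- the head of dropWhile does not satisfy the predicate
theorem pvHead_dropWhile {α : Type} (p : α → Bool) (xs : List α) (h : α)
    (hh : (xs.dropWhile p).head? = some h) : p h = false := by
  induction xs with
  | nil => simp at hh
  | cons x xs ih =>
    by_cases hx : p x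
    · rw [List.dropWhile_cons_of_pos hx] at hh; exact ih hh
    · rw [List.dropWhile_cons_of_neg hx] at hh
      simp at hh; subst hh; simpa using hx

-- a leading non-emptysign char is emitted verbatim by the encoder
theorem pvEnc_cons_ne (es : List Char) (c : Char) (rest : List Char) (hc : ¬ ([c] = es)) :
    grid2fenEnc es (c :: rest) = c :: grid2fenEnc es rest := by
  match rest with
  | [] => simp [pvEnc_cons, pvEnc_nil, hc]
  | d :: rest' =>
    by_cases hd : d = c
    · subst hd
      rw [pvEnc_cons, pvEnc_cons, if_neg hc, if_neg hc]
      simp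
    · rw [pvEnc_cons, if_neg hc,
          List.takeWhile_cons_of_neg (by simpa using hd),
          List.dropWhile_cons_of_neg (by simpa using hd)]
      simp

-- key row lemma: A's inner loop followed by the flush computes B's run-length encoding
theorem pvRow (es : List Char) : ∀ n (row : List Char), row.length ≤ n → ∀ (s : List Char) (k : Int),
    0 ≤ k → (k = 0 ∨ ∀ h, row.head? = some h → ¬ ([h] = es)) →
    pvFlush (row.foldl (grid2fenInner es) (s, k)) = pvFlush (s, k) ++ grid2fenEnc es row := by
  intro n
  induction n with
  | zero =>
    intro row hlen s k _ _
    have : row = [] := List.eq_nil_of_length_eq_zero (Nat.le_zero.mp hlen)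
    subst this; simp [pvEnc_nil]
  | succ n ih =>
    intro row hlen s k hk hside
    match row with
    | [] => simp [pvEnc_nil]
    | c :: rest =>
      by_cases hc : [c] = es
      · -- the row starts with an emptysign run; then k = 0 by the side condition
        have hk0 : k = 0 := by
          rcases hside with h | h
          · exact h
          · exact absurd hc (h c rfl)
        subst hk0
        have hsplit : rest = rest.takeWhile (· = c) ++ rest.dropWhile (· = c) :=
          (List.takeWhile_append_dropWhile).symm
        set run := rest.takeWhile (· = c) with hrun
        set rem := rest.dropWhile (· = c) with hrem
        have hrunall : ∀ ch ∈ run, [ch] = es := by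
          intro ch hch
          have := List.mem_takeWhile_imp hch
          simp at this; rw [this]; exact hc
        have hstep : grid2fenInner es (s, 0) c = (s, 1) := by simp [grid2fenInner, hc]
        have hfold : (c :: rest).foldl (grid2fenInner es) (s, 0)
            = rem.foldl (grid2fenInner es) (s, 1 + run.length) := by
          rw [List.foldl_cons, hstep]
          conv_lhs => rw [hsplit]
          rw [List.foldl_append, pvInner_run es run hrunall]
        have hremlen : rem.length ≤ n := by
          have h1 : rem.length ≤ rest.length := List.length_dropWhile_le _ _
          simp at hlen; omega
        have hremhead : ∀ h, rem.head? = some h → ¬ ([h] = es) := by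
          intro h hh heq
          have hne := pvHead_dropWhile (· = c) rest h hh
          simp at hne
          have : h = c := by simpa using heq.trans hc.symm
          exact hne this
        have h1 : (1 : Int) + (run.length : Int) ≠ 0 := by positivity
        rw [hfold, ih rem hremlen s (1 + run.length) (by positivity) (Or.inr hremhead),
            pvFlush_ne s _ h1, pvFlush_zero, pvEnc_cons, if_pos hc, ← hrun, ← hrem,
            show (1 : Int) + (run.length : Int) = (run.length : Int) + 1 from by ring]
        simp
      · -- the row starts with a non-emptysign char: flush, emit c, continue with counter 0
        have hstep : grid2fenInner es (s, k) c = (pvFlush (s, k) ++ [c], 0) := by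
          by_cases hk0 : k = 0
          · subst hk0; simp [grid2fenInner, hc, pvFlush]
          · simp [grid2fenInner, hc, pvFlush, hk0]
        have hlen' : rest.length ≤ n := by simp at hlen; omega
        rw [List.foldl_cons, hstep, ih rest hlen' _ 0 le_rfl (Or.inl rfl),
            pvFlush_zero, pvEnc_cons_ne es c rest hc]
        simp

-- one step of A's outer loop, phrased with pvFlush
theorem pvOuter_step (es : List Char) (nrows : Nat) (s : List Char) (e : Int) (x : List Char) :
    grid2fenOuter es nrows (s, 0, e) x
      = ((if e + 1 ≠ (nrows : Int)
          then pvFlush (x.foldl (grid2fenInner es) (s, 0)) ++ ['/']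
          else pvFlush (x.foldl (grid2fenInner es) (s, 0))), 0, e + 1) := rfl

-- outer loop: processing the remaining rows appends the '/'-joined encodings
theorem pvOuter (es : List Char) (nrows : Nat) :
    ∀ (rows : List (List Char)) (s : List Char) (e : Int),
    e + rows.length = (nrows : Int) →
    (rows.foldl (grid2fenOuter es nrows) (s, 0, e)).1
      = s ++ PySem.Chars.join ['/'] (rows.map (grid2fenEnc es)) := by
  intro rows
  induction rows with
  | nil => intro s e _; simp [PySem.Chars.join_nil]
  | cons x rest ih =>
    intro s e he
    have hrow := pvRow es x.length x le_rfl s 0 le_rfl (Or.inl rfl)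
    rw [pvFlush_zero] at hrow
    rw [List.foldl_cons, pvOuter_step, hrow]
    match rest with
    | [] =>
      have hone : e + 1 = (nrows : Int) := by simpa using he
      rw [if_neg (by simp [hone])]
      simp [PySem.Chars.join_singleton]
    | y :: rest' =>
      have hne : e + 1 ≠ (nrows : Int) := by simp at he; omega
      rw [if_pos hne, ih _ (e + 1) (by simp at he ⊢; omega)]
      conv_rhs => rw [List.map_cons, List.map_cons, PySem.Chars.join_cons_cons]
      simp

-- ===== VERDICT (by name: the statement is the Claim_ definition above) =====
theorem grid2fen_spec : Claim_equal_grid2fen := by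
  intro grid emptysign _
  show grid2fen grid emptysign = grid2fen_alt grid emptysign
  unfold grid2fen grid2fen_alt
  exact congrArg String.ofList
    ((pvOuter emptysign.toList (PySem.Chars.splitOn grid.toList ['\n']).length
      (PySem.Chars.splitOn grid.toList ['\n']) [] 0 (by simp)).trans (by simp))
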